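-- pv_equiv track=rewrite | github.com/jpshackelford/OpenPaw | scripts/quality_report.py | _get_error_summary
-- ===== SOURCE A (Python) =====
-- def _get_error_summary(text: str, message: str) -> str:
--     """Extract a useful error summary from failure text."""
--     # Look for pytest's "E" lines which contain the actual error
--     for line in text.split("\n"):
--         line = line.strip()
--         if line.startswith("E ") and len(line) > 2:
--             return line[2:].strip()[:100]
--
--     # Look for common error patterns
--     for line in text.split("\n"):
--         line = line.strip()
--         # Skip pytest formatting lines
--         if line.startswith(">") or line.startswith("_"):
--             continue
--         # Look for exception lines
--         if "Error:" in line or "Exception:" in line or "assert " in line.lower():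
--             return line[:100]
--
--     # Fall back to message attribute
--     if message:
--         return message[:100]
--
--     return ""
-- ===== SOURCE B (Python) =====
-- def _get_error_summary(text: str, message: str) -> str:
--     """Single pass: return the first 'E ' line immediately; remember the first
--     error-pattern line as a fallback candidate; message as last resort."""
--     candidate = None
--     for raw in text.split("\n"):
--         line = raw.strip()
--         if line.startswith("E ") and len(line) > 2:
--             return line[2:].strip()[:100]
--         if candidate is None:
--             if line.startswith(">") or line.startswith("_"):
--                 continue
--             if "Error:" in line or "Exception:" in line or "assert " in line.lower():
--                 candidate = line[:100]
--     if candidate is not None: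
--         return candidate
--     return message[:100] if message else ""
-- ===== Notes on version B (the rewrite author's own statement) =====
-- stated objective: simpler
-- what changed: A's two sequential full scans of the split lines (one for pytest 'E ' lines, then one for error-pattern lines) are merged into a single pass that returns an 'E ' line immediately and remembers the first error-pattern line as a fallback candidate.
import Mathlib
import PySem

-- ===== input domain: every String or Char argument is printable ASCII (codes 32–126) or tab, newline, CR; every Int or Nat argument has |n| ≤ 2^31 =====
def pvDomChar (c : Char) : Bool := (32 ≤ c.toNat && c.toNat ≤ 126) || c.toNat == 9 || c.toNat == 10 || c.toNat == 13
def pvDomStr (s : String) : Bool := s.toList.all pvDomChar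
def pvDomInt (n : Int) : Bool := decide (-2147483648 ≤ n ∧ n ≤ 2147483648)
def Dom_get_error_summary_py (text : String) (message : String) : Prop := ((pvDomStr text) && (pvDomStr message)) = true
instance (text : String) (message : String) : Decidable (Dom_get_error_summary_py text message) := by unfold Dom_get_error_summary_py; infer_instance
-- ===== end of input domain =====

-- B replaces A's two sequential scans of the lines by one single pass that returns an "E " line
-- immediately and remembers the first error-pattern line as a fallback candidate (objective: simpler).

-- ===== PORT A =====
-- first loop: pytest "E " lines
def gesA_pass1 : List String → Option String
  | [] => none
  | raw :: rest =>
    let line := PySem.Str.strip raw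
    if PySem.Str.startswith line "E " && decide (2 < PySem.Str.len line) then
      some (PySem.Str.slice (PySem.Str.strip (PySem.Str.slice line (some 2) none)) none (some 100))
    else gesA_pass1 rest

-- second loop: common error patterns
def gesA_pass2 : List String → Option String
  | [] => none
  | raw :: rest =>
    let line := PySem.Str.strip raw
    if PySem.Str.startswith line ">" || PySem.Str.startswith line "_" then
      gesA_pass2 rest
    else if PySem.Str.isIn "Error:" line || PySem.Str.isIn "Exception:" line
         || PySem.Str.isIn "assert " (PySem.Str.lower line) then
      some (PySem.Str.slice line none (some 100))
    else gesA_pass2 rest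

def get_error_summary_py (text : String) (message : String) : String :=
  match gesA_pass1 ((PySem.Str.split? text "\n").getD []) with
  | some r => r
  | none =>
    match gesA_pass2 ((PySem.Str.split? text "\n").getD []) with
    | some r => r
    | none =>
      if 0 < PySem.Str.len message then PySem.Str.slice message none (some 100) else ""

-- ===== PORT B =====
-- after the single loop: the stored candidate, else the message, else ""
def gesB_fallback (cand : Option String) (message : String) : String :=
  match cand with
  | some c => c
  | none =>
    if 0 < PySem.Str.len message then PySem.Str.slice message none (some 100) else ""

-- the single pass with the fallback candidate
def gesB_loop : List String → Option String → String → String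
  | [], cand, message => gesB_fallback cand message
  | raw :: rest, cand, message =>
    let line := PySem.Str.strip raw
    if PySem.Str.startswith line "E " && decide (2 < PySem.Str.len line) then
      PySem.Str.slice (PySem.Str.strip (PySem.Str.slice line (some 2) none)) none (some 100)
    else
      let cand' : Option String :=
        match cand with
        | some c => some c
        | none =>
          if PySem.Str.startswith line ">" || PySem.Str.startswith line "_" then none
          else if PySem.Str.isIn "Error:" line || PySem.Str.isIn "Exception:" line
               || PySem.Str.isIn "assert " (PySem.Str.lower line) then
            some (PySem.Str.slice line none (some 100))
          else none
      gesB_loop rest cand' message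

def get_error_summary_py_alt (text : String) (message : String) : String :=
  gesB_loop ((PySem.Str.split? text "\n").getD []) none message

-- ===== PRECONDITION & SPEC =====
def Spec_get_error_summary_py (text : String) (message : String) (out : String) : Prop := out = get_error_summary_py_alt text message
instance (text : String) (message : String) (out : String) : Decidable (Spec_get_error_summary_py text message out) := by unfold Spec_get_error_summary_py; infer_instance

-- ===== CLAIM (what is proved, stated in full; the proofs are below) =====
def Claim_equal_get_error_summary_py : Prop := ∀ (text : String) (message : String), Dom_get_error_summary_py text message → Spec_get_error_summary_py text message (get_error_summary_py text message)

-- ===== LEMMAS AND PROOFS =====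
-- the single pass equals: first "E " hit, else the first stored candidate, else the pattern scan, else the fallback
theorem gesB_loop_eq (lines : List String) (cand : Option String) (message : String) :
    gesB_loop lines cand message =
      match gesA_pass1 lines with
      | some r => r
      | none =>
        match cand with
        | some c => c
        | none =>
          match gesA_pass2 lines with
          | some r => r
          | none => gesB_fallback none message := by
  induction lines generalizing cand with
  | nil => cases cand <;> simp [gesB_loop, gesA_pass1, gesA_pass2, gesB_fallback]
  | cons raw rest ih =>
    simp only [gesB_loop, gesA_pass1, gesA_pass2]
    by_cases hE : (PySem.Str.startswith (PySem.Str.strip raw) "E "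
        && decide (2 < PySem.Str.len (PySem.Str.strip raw))) = true
    · simp only [if_pos hE]
    · simp only [if_neg hE]
      by_cases hskip : (PySem.Str.startswith (PySem.Str.strip raw) ">"
          || PySem.Str.startswith (PySem.Str.strip raw) "_") = true
      · simp only [if_pos hskip]
        cases cand <;> rw [ih]
      · simp only [if_neg hskip]
        by_cases hpat : (PySem.Str.isIn "Error:" (PySem.Str.strip raw)
            || PySem.Str.isIn "Exception:" (PySem.Str.strip raw)
            || PySem.Str.isIn "assert " (PySem.Str.lower (PySem.Str.strip raw))) = true
        · simp only [if_pos hpat]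
          cases cand <;> rw [ih]
        · simp only [if_neg hpat]
          cases cand <;> rw [ih]

-- ===== VERDICT (by name: the statement is the Claim_ definition above) =====
theorem get_error_summary_py_spec : Claim_equal_get_error_summary_py := by
  intro text message _
  unfold Spec_get_error_summary_py get_error_summary_py get_error_summary_py_alt
  rw [gesB_loop_eq]
  cases gesA_pass1 ((PySem.Str.split? text "\n").getD []) <;>
    cases h2 : gesA_pass2 ((PySem.Str.split? text "\n").getD []) <;>
    simp [gesB_fallback, h2]
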